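-- pv_equiv track=rewrite | github.com/Hgabe/Otimizando-Rota-de-Drones | legacy/astas3d.py | render_order
-- ===== SOURCE A (Python) =====
-- def render_order(maze_size):
--     cells = []
--     for s in range(2*maze_size-1):
--         for col in range(s+1):
--             row = s - col
--             if 0 <= col < maze_size and 0 <= row < maze_size:
--                 cells.append((col, row))
--     return cells
-- ===== SOURCE B (Python) =====
-- def render_order(maze_size):
--     buckets = [[] for _ in range(2 * maze_size - 1)]
--     for col in range(maze_size):
--         for row in range(maze_size):
--             buckets[col + row].append((col, row))
--     return [cell for bucket in buckets for cell in bucket]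
-- ===== Notes on version B (the rewrite author's own statement) =====
-- stated objective: alternative
-- what changed: Replaces A's anti-diagonal walk with an out-of-board filter by a distribution pass: enumerate the grid row-major, drop each cell into a per-diagonal bucket indexed by col+row, and concatenate the buckets; no filtering and no diagonal index arithmetic.
import Mathlib
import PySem

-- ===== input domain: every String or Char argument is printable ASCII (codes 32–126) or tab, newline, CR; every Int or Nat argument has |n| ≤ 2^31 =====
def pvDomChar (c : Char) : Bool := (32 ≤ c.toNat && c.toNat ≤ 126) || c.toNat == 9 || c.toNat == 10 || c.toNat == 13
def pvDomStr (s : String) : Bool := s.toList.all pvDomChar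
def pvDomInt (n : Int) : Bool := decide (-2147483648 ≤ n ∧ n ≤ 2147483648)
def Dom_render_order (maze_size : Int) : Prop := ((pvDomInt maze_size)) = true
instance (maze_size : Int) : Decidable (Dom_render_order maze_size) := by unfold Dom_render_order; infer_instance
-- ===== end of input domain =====

-- B replaces A's diagonal walk with out-of-board filtering by a distribution pass:
-- enumerate the grid row-major into per-diagonal buckets and concatenate them; objective:
-- a genuinely different algorithm of similar cost. B mutates only its own local list.

-- ===== PORT A =====
def render_order (maze_size : Int) : List (Int × Int) :=
  (PySem.List.pyRange 0 (2 * maze_size - 1)).foldl (fun cells s =>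
    (PySem.List.pyRange 0 (s + 1)).foldl (fun cells col =>
      if (decide (0 ≤ col) && decide (col < maze_size)) &&
         (decide (0 ≤ s - col) && decide (s - col < maze_size)) then
        cells ++ [(col, s - col)]
      else cells) cells) []

-- ===== PORT B =====
def render_order_alt (maze_size : Int) : List (Int × Int) :=
  let buckets0 : List (List (Int × Int)) :=
    (PySem.List.pyRange 0 (2 * maze_size - 1)).map (fun _ => [])
  let buckets :=
    (PySem.List.pyRange 0 maze_size).foldl (fun bs col =>
      (PySem.List.pyRange 0 maze_size).foldl (fun bs row =>
        -- buckets[col + row].append((col, row)): whenever this runs, the index col + row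
        -- satisfies 0 ≤ col + row < 2*maze_size - 1, so List.modify at .toNat is exact
        bs.modify (col + row).toNat (fun bucket => bucket ++ [(col, row)])) bs) buckets0
  buckets.flatMap (fun bucket => bucket)

-- ===== PRECONDITION & SPEC =====
def Spec_render_order (maze_size : Int) (out : List (Int × Int)) : Prop := out = render_order_alt maze_size
instance (maze_size : Int) (out : List (Int × Int)) : Decidable (Spec_render_order maze_size out) := by unfold Spec_render_order; infer_instance

-- ===== CLAIM (what is proved, stated in full; the proofs are below) =====
def Claim_equal_render_order : Prop := ∀ (maze_size : Int), Dom_render_order maze_size → Spec_render_order maze_size (render_order maze_size)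

-- ===== LEMMAS AND PROOFS =====

-- the anti-diagonal list A builds, written as flatMap/filter/map
def pvT (n : Int) : List (Int × Int) :=
  (PySem.List.pyRange 0 (2 * n - 1)).flatMap (fun s =>
    ((PySem.List.pyRange 0 (s + 1)).filter (fun col =>
      (decide (0 ≤ col) && decide (col < n)) &&
      (decide (0 ≤ s - col) && decide (s - col < n)))).map (fun col => (col, s - col)))

lemma pvA_eq_T (n : Int) : render_order n = pvT n := by
  simp only [render_order, pvT, PySem.List.foldl_append_if,
    PySem.List.foldl_append_eq_flatMap, List.nil_append]

-- modifying a mapped range at an in-range index is a pointwise update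
lemma pv_modify_map (M : Int) (F : Int → List (Int × Int))
    (f : List (Int × Int) → List (Int × Int)) (t : Int) (h0 : 0 ≤ t) (_h1 : t < M) :
    ((PySem.List.pyRange 0 M).map F).modify t.toNat f =
    (PySem.List.pyRange 0 M).map (fun s => if s = t then f (F s) else F s) := by
  apply List.ext_getElem
  · simp [List.length_modify]
  · intro i hi1 hi2
    rw [List.getElem_modify]
    simp only [List.getElem_map, PySem.List.getElem_pyRange_one]
    split_ifs <;> first | rfl | (exfalso; omega)

-- one cell's inner loop: each row lands in its own diagonal bucket
lemma pv_inner (M col : Int) :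
    ∀ (R : List Int) (F : Int → List (Int × Int)),
      (∀ r ∈ R, 0 ≤ col + r ∧ col + r < M) →
      R.foldl (fun bs row => bs.modify (col + row).toNat
          (fun bucket => bucket ++ [(col, row)])) ((PySem.List.pyRange 0 M).map F) =
      (PySem.List.pyRange 0 M).map (fun s =>
        F s ++ (R.filter (fun r => decide (col + r = s))).map (fun r => (col, r))) := by
  intro R
  induction R with
  | nil => intro F _; simp
  | cons r R ih =>
    intro F h
    simp only [List.foldl_cons]
    rw [pv_modify_map M F _ (col + r) (h r (by simp)).1 (h r (by simp)).2]
    rw [ih _ (fun x hx => h x (by simp [hx]))]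
    apply List.map_congr_left
    intro s _
    by_cases hs : col + r = s
    · simp [hs]
    · simp [hs, Ne.symm hs]

-- a range filtered down to one equality is a singleton or empty
lemma pv_filter_singleton (t : Int) :
    ∀ (m : Nat) (a : Int),
      (PySem.List.pyRange a (a + m)).filter (fun r => decide (r = t)) =
      if a ≤ t ∧ t < a + m then [t] else [] := by
  intro m
  induction m with
  | zero =>
    intro a
    simp only [Nat.cast_zero, add_zero]
    have h0 : PySem.List.pyRange a a = [] := by
      apply List.eq_nil_of_length_eq_zero
      rw [PySem.List.length_pyRange_one]; omega
    rw [h0]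
    simp only [List.filter_nil]
    rw [if_neg (by omega)]
  | succ m ih =>
    intro a
    have e : ((m + 1 : Nat) : Int) = (m : Int) + 1 := by omega
    rw [e]
    rw [PySem.List.pyRange_one_cons (by omega : a < a + ((m : Int) + 1))]
    rw [List.filter_cons]
    have e2 : a + ((m : Int) + 1) = (a + 1) + (m : Nat) := by omega
    rw [e2, ih (a + 1)]
    by_cases hat : a = t
    · subst hat
      simp only [decide_true, if_true]
      rw [if_neg (by omega), if_pos (by omega)]
    · rw [decide_eq_false hat]
      simp only [Bool.false_eq_true, if_false]
      by_cases hin : a + 1 ≤ t ∧ t < (a + 1) + (m : Nat)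
      · rw [if_pos hin, if_pos (by omega)]
      · rw [if_neg hin, if_neg (by omega)]

-- the whole double loop: bucket s collects (col, s - col) for the processed cols hitting it
lemma pv_outer (n M : Int) (hM : 2 * n - 1 ≤ M) :
    ∀ (C : List Int) (F : Int → List (Int × Int)),
      (∀ c ∈ C, 0 ≤ c ∧ c < n) →
      C.foldl (fun bs col =>
          (PySem.List.pyRange 0 n).foldl (fun bs row => bs.modify (col + row).toNat
            (fun bucket => bucket ++ [(col, row)])) bs) ((PySem.List.pyRange 0 M).map F) =
      (PySem.List.pyRange 0 M).map (fun s =>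
        F s ++ (C.filter (fun col => decide (0 ≤ s - col) && decide (s - col < n))).map
          (fun col => (col, s - col))) := by
  intro C
  induction C with
  | nil => intro F _; simp
  | cons c C ih =>
    intro F h
    have hc := h c (by simp)
    simp only [List.foldl_cons]
    rw [pv_inner M c (PySem.List.pyRange 0 n) F (fun r hr => by
      rw [PySem.List.mem_pyRange_one] at hr; omega)]
    rw [ih _ (fun x hx => h x (by simp [hx]))]
    apply List.map_congr_left
    intro s _
    have hn0 : (0 : Int) + (n.toNat : Int) = n := by omega
    have hfil : (PySem.List.pyRange 0 n).filter (fun r => decide (c + r = s)) =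
        if 0 ≤ s - c ∧ s - c < n then [s - c] else [] := by
      have hcong : (PySem.List.pyRange 0 n).filter (fun r => decide (c + r = s)) =
          (PySem.List.pyRange 0 n).filter (fun r => decide (r = s - c)) := by
        apply List.filter_congr
        intro x _
        simp only [decide_eq_decide]
        omega
      rw [hcong, show PySem.List.pyRange 0 n = PySem.List.pyRange 0 (0 + (n.toNat : Int))
        from by rw [hn0], pv_filter_singleton (s - c) n.toNat 0]
      split_ifs <;> first | rfl | (exfalso; omega)
    rw [hfil, List.filter_cons]
    by_cases hp : 0 ≤ s - c ∧ s - c < n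
    · have hqc : (decide (0 ≤ s - c) && decide (s - c < n)) = true := by
        simp only [Bool.and_eq_true, decide_eq_true_eq]
        exact hp
      rw [if_pos hp, hqc, if_pos rfl]
      simp [List.append_assoc]
    · have hqc : (decide (0 ≤ s - c) && decide (s - c < n)) = false := by
        rcases not_and_or.1 hp with h' | h'
        · rw [decide_eq_false h', Bool.false_and]
        · rw [decide_eq_false h', Bool.and_false]
      rw [if_neg hp, hqc]
      simp

-- per diagonal, B's bucket content equals A's filtered walk of that diagonal
lemma pv_diag_eq (n s : Int) (hs : 0 ≤ s) (hsn : s < 2 * n - 1) :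
    ((PySem.List.pyRange 0 n).filter (fun col =>
        decide (0 ≤ s - col) && decide (s - col < n))).map (fun col => (col, s - col)) =
    ((PySem.List.pyRange 0 (s + 1)).filter (fun col =>
        (decide (0 ≤ col) && decide (col < n)) &&
        (decide (0 ≤ s - col) && decide (s - col < n)))).map (fun col => (col, s - col)) := by
  have hn : 0 < n := by omega
  set q : Int → Bool := fun col =>
    (decide (0 ≤ col) && decide (col < n)) && (decide (0 ≤ s - col) && decide (s - col < n))
    with hq
  have left : (PySem.List.pyRange 0 n).filter (fun col =>
      decide (0 ≤ s - col) && decide (s - col < n)) =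
      (PySem.List.pyRange 0 (n + s + 1)).filter q := by
    rw [PySem.List.pyRange_one_append 0 n (n + s + 1) (by omega) (by omega),
      List.filter_append]
    have h2 : (PySem.List.pyRange n (n + s + 1)).filter q = [] := by
      rw [List.filter_eq_nil_iff]
      intro x hx
      rw [PySem.List.mem_pyRange_one] at hx
      simp only [hq, Bool.and_eq_true, decide_eq_true_eq, not_and]
      omega
    rw [h2, List.append_nil]
    apply List.filter_congr
    intro x hx
    rw [PySem.List.mem_pyRange_one] at hx
    simp only [hq]
    rw [Bool.eq_iff_iff]
    simp only [Bool.and_eq_true, decide_eq_true_eq]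
    omega
  have right : (PySem.List.pyRange 0 (s + 1)).filter q =
      (PySem.List.pyRange 0 (n + s + 1)).filter q := by
    rw [PySem.List.pyRange_one_append 0 (s + 1) (n + s + 1) (by omega) (by omega),
      List.filter_append]
    have h2 : (PySem.List.pyRange (s + 1) (n + s + 1)).filter q = [] := by
      rw [List.filter_eq_nil_iff]
      intro x hx
      rw [PySem.List.mem_pyRange_one] at hx
      simp only [hq, Bool.and_eq_true, decide_eq_true_eq, not_and]
      omega
    rw [h2, List.append_nil]
  rw [left, right]

lemma pvB_eq_T (n : Int) : render_order_alt n = pvT n := by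
  rw [render_order_alt]
  rw [pv_outer n (2 * n - 1) (by omega) (PySem.List.pyRange 0 n)
    (fun _ => []) (fun c hc => by rw [PySem.List.mem_pyRange_one] at hc; omega)]
  rw [pvT, List.flatMap_def, List.flatMap_def, List.map_map]
  congr 1
  apply List.map_congr_left
  intro s hs
  rw [PySem.List.mem_pyRange_one] at hs
  simpa using pv_diag_eq n s hs.1 hs.2

-- ===== VERDICT (by name: the statement is the Claim_ definition above) =====
theorem render_order_spec : Claim_equal_render_order := by
  intro n _
  unfold Spec_render_order
  rw [pvA_eq_T, pvB_eq_T]
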